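-- pv_equiv track=rewrite | github.com/manoharnv/autonomus_sre_bot | src/autonomous_sre_bot/tools/log_analyzer_tool.py | _suggest_actions
-- ===== SOURCE A (Python) =====
-- from typing import Type, List, Dict
--
-- def _suggest_actions(log_entries: List[Dict]) -> str:
--     """Suggest actions based on log analysis."""
--     error_logs = [log for log in log_entries if log["severity"] in ["ERROR", "FATAL"]]
--
--     if not error_logs:
--         return "No critical issues requiring immediate action."
--
--     # Count errors by service
--     service_errors = {}
--     for log in error_logs:
--         service = log["service"]
--         service_errors[service] = service_errors.get(service, 0) + 1
--
--     # Find the most problematic services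
--     problematic_services = sorted(service_errors.items(), key=lambda x: x[1], reverse=True)
--
--     recommendations = "Based on the log analysis, consider the following actions:\n\n"
--
--     if problematic_services:
--         top_service, error_count = problematic_services[0]
--         recommendations += f"1. **Investigate {top_service}**: This service has the highest error count ({error_count}).\n"
--
--     # Check for connection issues
--     if any("connection" in log["message"].lower() for log in error_logs):
--         recommendations += "2. **Check network connectivity**: There are signs of connection problems between services.\n"
--
--     # Check for timeout issues
--     if any("timeout" in log["message"].lower() for log in error_logs):
--         recommendations += "3. **Review timeout settings**: Consider increasing timeouts or optimizing slow operations.\n"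
--
--     # Check for authentication issues
--     if any("authentication" in log["message"].lower() or "unauthorized" in log["message"].lower() for log in error_logs):
--         recommendations += "4. **Verify authentication configurations**: There are authentication failures in the system.\n"
--
--     # General recommendation
--     recommendations += "5. **Set up alerts**: Configure alerts for recurring error patterns to catch issues early.\n"
--
--     return recommendations
-- ===== SOURCE B (Python) =====
-- def _suggest_actions(log_entries):
--     """Suggest actions based on log analysis (single fused pass)."""
--     service_errors = {}
--     has_conn = has_timeout = has_auth = False
--     for log in log_entries:
--         sev = log["severity"]
--         if sev == "ERROR" or sev == "FATAL":
--             service = log["service"]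
--             service_errors[service] = service_errors.get(service, 0) + 1
--             message = log["message"].lower()
--             if "connection" in message:
--                 has_conn = True
--             if "timeout" in message:
--                 has_timeout = True
--             if "authentication" in message or "unauthorized" in message:
--                 has_auth = True
--     if not service_errors:
--         return "No critical issues requiring immediate action."
--     top_service, error_count = max(service_errors.items(), key=lambda x: x[1])
--     return (
--         "Based on the log analysis, consider the following actions:\n\n"
--         + f"1. **Investigate {top_service}**: This service has the highest error count ({error_count}).\n"
--         + ("2. **Check network connectivity**: There are signs of connection problems between services.\n" if has_conn else "")
--         + ("3. **Review timeout settings**: Consider increasing timeouts or optimizing slow operations.\n" if has_timeout else "")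
--         + ("4. **Verify authentication configurations**: There are authentication failures in the system.\n" if has_auth else "")
--         + "5. **Set up alerts**: Configure alerts for recurring error patterns to catch issues early.\n"
--     )
-- ===== Notes on version B (the rewrite author's own statement) =====
-- stated objective: simpler
-- what changed: Replaces A's filter comprehension + separate counting loop + sort-and-take-first + three independent any() scans with ONE fused pass that simultaneously counts errors per service and sets three keyword flags, then picks the top service with max(items, key=count) (same first-max tie-break as A's stable reverse sort) and assembles the result as one expression instead of incremental +=.
import Mathlib
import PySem

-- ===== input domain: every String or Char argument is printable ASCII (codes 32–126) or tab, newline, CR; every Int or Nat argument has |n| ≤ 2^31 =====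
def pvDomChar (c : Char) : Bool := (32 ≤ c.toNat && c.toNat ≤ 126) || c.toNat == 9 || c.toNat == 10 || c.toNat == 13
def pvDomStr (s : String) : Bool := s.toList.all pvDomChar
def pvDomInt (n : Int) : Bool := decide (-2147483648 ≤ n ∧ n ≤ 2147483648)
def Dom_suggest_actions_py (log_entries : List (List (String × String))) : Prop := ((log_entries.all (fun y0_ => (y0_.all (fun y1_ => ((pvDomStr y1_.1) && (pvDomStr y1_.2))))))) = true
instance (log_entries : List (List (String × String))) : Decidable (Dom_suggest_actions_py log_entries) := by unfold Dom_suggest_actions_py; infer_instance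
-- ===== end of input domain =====

-- B fuses A's filter + counting loop + sort-and-take-first + three any() scans into one
-- pass with a per-service counter and three keyword flags, then takes max by count; simpler decomposition.


-- shared helper: log[k] (first-match association-list lookup; "" only outside Pre_, where Python raises KeyError)
def pvGet (log : List (String × String)) (k : String) : String :=
  ((log.find? (fun p => p.1 == k)).map Prod.snd).getD ""

def pvHasKey (log : List (String × String)) (k : String) : Bool :=
  (log.find? (fun p => p.1 == k)).isSome

-- the fixed text fragments of the recommendation string
def pvLine0 : String := "Based on the log analysis, consider the following actions:\n\n"
def pvLine2 : String := "2. **Check network connectivity**: There are signs of connection problems between services.\n"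
def pvLine3 : String := "3. **Review timeout settings**: Consider increasing timeouts or optimizing slow operations.\n"
def pvLine4 : String := "4. **Verify authentication configurations**: There are authentication failures in the system.\n"
def pvLine5 : String := "5. **Set up alerts**: Configure alerts for recurring error patterns to catch issues early.\n"
def pvNoIssues : String := "No critical issues requiring immediate action."
def pvLine1 (top : String) (ec : Int) : String :=
  "1. **Investigate " ++ top ++ "**: This service has the highest error count (" ++ PySem.Int.toStr ec ++ ").\n"

-- ===== PORT A =====
def suggest_actions_py (log_entries : List (List (String × String))) : String :=
  let error_logs := log_entries.filter
    (fun log => decide (pvGet log "severity" ∈ (["ERROR", "FATAL"] : List String)))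
  if error_logs.isEmpty then pvNoIssues
  else
    let service_errors := error_logs.foldl
      (fun d log => d.insert (pvGet log "service") (d.getD (pvGet log "service") 0 + 1))
      (PySem.Dict.empty : PySem.Dict String Int)
    let problematic_services := PySem.List.sorted service_errors.items (fun x => x.2) true
    let rec0 := pvLine0
    let rec1 := match problematic_services with
      | (top_service, error_count) :: _ => rec0 ++ pvLine1 top_service error_count
      | [] => rec0
    let rec2 := if error_logs.any (fun log => PySem.Str.isIn "connection" (PySem.Str.lower (pvGet log "message")))
      then rec1 ++ pvLine2 else rec1
    let rec3 := if error_logs.any (fun log => PySem.Str.isIn "timeout" (PySem.Str.lower (pvGet log "message")))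
      then rec2 ++ pvLine3 else rec2
    let rec4 := if error_logs.any (fun log => PySem.Str.isIn "authentication" (PySem.Str.lower (pvGet log "message")) || PySem.Str.isIn "unauthorized" (PySem.Str.lower (pvGet log "message")))
      then rec3 ++ pvLine4 else rec3
    rec4 ++ pvLine5

-- ===== PORT B =====
def suggest_actions_py_alt (log_entries : List (List (String × String))) : String :=
  let st := log_entries.foldl
    (fun st log =>
      if pvGet log "severity" == "ERROR" || pvGet log "severity" == "FATAL" then
        (st.1.insert (pvGet log "service") (st.1.getD (pvGet log "service") 0 + 1),
         (if PySem.Str.isIn "connection" (PySem.Str.lower (pvGet log "message")) then true else st.2.1),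
         (if PySem.Str.isIn "timeout" (PySem.Str.lower (pvGet log "message")) then true else st.2.2.1),
         (if PySem.Str.isIn "authentication" (PySem.Str.lower (pvGet log "message")) || PySem.Str.isIn "unauthorized" (PySem.Str.lower (pvGet log "message")) then true else st.2.2.2))
      else st)
    ((PySem.Dict.empty : PySem.Dict String Int), false, false, false)
  match PySem.List.max? st.1.items (fun x => x.2) with
  | none => pvNoIssues
  | some (top_service, error_count) =>
      pvLine0 ++ pvLine1 top_service error_count
        ++ (if st.2.1 then pvLine2 else "")
        ++ (if st.2.2.1 then pvLine3 else "")
        ++ (if st.2.2.2 then pvLine4 else "")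
        ++ pvLine5

-- ===== PRECONDITION & SPEC =====
-- Pre_ excludes inputs where Python A raises KeyError (a log without "severity", or an
-- ERROR/FATAL log without "service"/"message"); it requires "message" on EVERY error log,
-- which also excludes the corner where A's lazy any() scans return before reaching a
-- message-less error log — B's single pass reads every error log's message and raises there.
def Pre_suggest_actions_py (log_entries : List (List (String × String))) : Prop :=
  ∀ log ∈ log_entries, pvHasKey log "severity" = true ∧
    (pvGet log "severity" ∈ (["ERROR", "FATAL"] : List String) →
      pvHasKey log "service" = true ∧ pvHasKey log "message" = true)
instance (log_entries : List (List (String × String))) : Decidable (Pre_suggest_actions_py log_entries) := by unfold Pre_suggest_actions_py; infer_instance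

def pvWitness_suggest_actions_py : (List (List (String × String))) :=
  [[("severity", "ERROR"), ("service", "api"), ("message", "connection timeout")],
   [("severity", "INFO")]]

def Spec_suggest_actions_py (log_entries : List (List (String × String))) (out : String) : Prop := out = suggest_actions_py_alt log_entries
instance (log_entries : List (List (String × String))) (out : String) : Decidable (Spec_suggest_actions_py log_entries out) := by unfold Spec_suggest_actions_py; infer_instance

-- ===== CLAIM (what is proved, stated in full; the proofs are below) =====
def Claim_equal_suggest_actions_py : Prop := ∀ (log_entries : List (List (String × String))), Dom_suggest_actions_py log_entries → Pre_suggest_actions_py log_entries → Spec_suggest_actions_py log_entries (suggest_actions_py log_entries)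

-- ===== LEMMAS AND PROOFS =====

-- head of Python's stable reverse sort by key = Python's max(xs, key=…): both are the
-- FIRST element of maximal key.
theorem pv_head_foldl_insertBy {α : Type} (key : α → Int) (xs acc : List α) :
    (xs.foldl (fun acc x => PySem.List.insertBy (fun a b => decide (key b < key a)) x acc) acc).head? =
      xs.foldl (fun m x => match m with
        | none => some x
        | some m => if key m < key x then some x else some m) acc.head? := by
  induction xs generalizing acc with
  | nil => rfl
  | cons x t ih =>
      rw [List.foldl_cons, List.foldl_cons, ih]
      congr 1
      cases acc with
      | nil => rfl
      | cons m ys =>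
          simp only [PySem.List.insertBy, List.head?]
          split_ifs with h <;> simp_all

theorem pv_head_sorted_rev_eq_max? {α : Type} (key : α → Int) (xs : List α) :
    (PySem.List.sorted xs key true).head? = PySem.List.max? xs key := by
  rw [PySem.List.sorted_rev_eq_foldl_insertBy]
  exact pv_head_foldl_insertBy key xs []


-- A's membership test equals B's two-way comparison
theorem pv_pred_eq (log : List (String × String)) :
    (decide (pvGet log "severity" ∈ (["ERROR", "FATAL"] : List String)))
      = (pvGet log "severity" == "ERROR" || pvGet log "severity" == "FATAL") := by
  by_cases h1 : pvGet log "severity" = "ERROR" <;> by_cases h2 : pvGet log "severity" = "FATAL" <;>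
    simp [h1, h2]

-- A's incremental += chain equals B's one-expression concatenation
theorem pv_chain (r : String) (c t a : Bool) (L2 L3 L4 L5 : String) :
    ((if a then ((if t then ((if c then r ++ L2 else r) ++ L3) else (if c then r ++ L2 else r))) ++ L4
        else ((if t then ((if c then r ++ L2 else r) ++ L3) else (if c then r ++ L2 else r)))) ++ L5)
      = r ++ (if c then L2 else "") ++ (if t then L3 else "") ++ (if a then L4 else "") ++ L5 := by
  cases c <;> cases t <;> cases a <;> simp [String.append_assoc, String.append_empty]

-- ===== VERDICT (by name: the statement is the Claim_ definition above) =====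
theorem suggest_actions_py_spec : Claim_equal_suggest_actions_py := by
  intro logs _ _
  show suggest_actions_py logs = suggest_actions_py_alt logs
  unfold suggest_actions_py suggest_actions_py_alt
  simp only [pv_pred_eq]
  rw [PySem.List.foldl_if_eq_foldl_filter
        (p := fun log => pvGet log "severity" == "ERROR" || pvGet log "severity" == "FATAL")
        (f := fun (st : PySem.Dict String Int × Bool × Bool × Bool) log =>
          (st.1.insert (pvGet log "service") (st.1.getD (pvGet log "service") 0 + 1),
           (if PySem.Str.isIn "connection" (PySem.Str.lower (pvGet log "message")) then true else st.2.1),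
           (if PySem.Str.isIn "timeout" (PySem.Str.lower (pvGet log "message")) then true else st.2.2.1),
           (if PySem.Str.isIn "authentication" (PySem.Str.lower (pvGet log "message")) || PySem.Str.isIn "unauthorized" (PySem.Str.lower (pvGet log "message")) then true else st.2.2.2)))]
  rw [PySem.List.foldl_prod_mk
        (f := fun (d : PySem.Dict String Int) log =>
          d.insert (pvGet log "service") (d.getD (pvGet log "service") 0 + 1))
        (g := fun (s : Bool × Bool × Bool) log =>
          ((if PySem.Str.isIn "connection" (PySem.Str.lower (pvGet log "message")) then true else s.1),
           (if PySem.Str.isIn "timeout" (PySem.Str.lower (pvGet log "message")) then true else s.2.1),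
           (if PySem.Str.isIn "authentication" (PySem.Str.lower (pvGet log "message")) || PySem.Str.isIn "unauthorized" (PySem.Str.lower (pvGet log "message")) then true else s.2.2)))]
  rw [PySem.List.foldl_prod_mk
        (f := fun (b : Bool) log =>
          (if PySem.Str.isIn "connection" (PySem.Str.lower (pvGet log "message")) then true else b))
        (g := fun (s : Bool × Bool) log =>
          ((if PySem.Str.isIn "timeout" (PySem.Str.lower (pvGet log "message")) then true else s.1),
           (if PySem.Str.isIn "authentication" (PySem.Str.lower (pvGet log "message")) || PySem.Str.isIn "unauthorized" (PySem.Str.lower (pvGet log "message")) then true else s.2)))]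
  rw [PySem.List.foldl_prod_mk
        (f := fun (b : Bool) log =>
          (if PySem.Str.isIn "timeout" (PySem.Str.lower (pvGet log "message")) then true else b))
        (g := fun (b : Bool) log =>
          (if PySem.Str.isIn "authentication" (PySem.Str.lower (pvGet log "message")) || PySem.Str.isIn "unauthorized" (PySem.Str.lower (pvGet log "message")) then true else b))]
  simp only [PySem.List.foldl_if_true_eq, Bool.false_or]
  generalize List.filter (fun log => pvGet log "severity" == "ERROR" || pvGet log "severity" == "FATAL") logs = E
  cases E with
  | nil => rfl
  | cons l0 t =>
      have hkne : ((l0 :: t).foldl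
          (fun (d : PySem.Dict String Int) log =>
            d.insert (pvGet log "service") (d.getD (pvGet log "service") 0 + 1)) PySem.Dict.empty).keys ≠ [] := by
        rw [PySem.Dict.keys_foldl_insert_key (key := fun log => pvGet log "service")
              (f := fun d log => d.getD (pvGet log "service") 0 + 1)]
        intro h
        have hm : pvGet l0 "service" ∈ ([] : List String) := by
          rw [← h, PySem.Set.mem_update]
          exact Or.inr (by simp)
        simp at hm
      have hine : ((l0 :: t).foldl
          (fun (d : PySem.Dict String Int) log =>
            d.insert (pvGet log "service") (d.getD (pvGet log "service") 0 + 1)) PySem.Dict.empty).items ≠ [] := by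
        intro h
        exact hkne (by simp only [PySem.Dict.keys, h, List.map_nil])
      obtain ⟨p, rest, hs⟩ : ∃ p rest, PySem.List.sorted ((l0 :: t).foldl
          (fun (d : PySem.Dict String Int) log =>
            d.insert (pvGet log "service") (d.getD (pvGet log "service") 0 + 1)) PySem.Dict.empty).items
          (fun x => x.2) true = p :: rest := by
        cases h : PySem.List.sorted ((l0 :: t).foldl
            (fun (d : PySem.Dict String Int) log =>
              d.insert (pvGet log "service") (d.getD (pvGet log "service") 0 + 1)) PySem.Dict.empty).items
            (fun x => x.2) true with
        | nil => exact absurd ((PySem.List.sorted_eq_nil_iff _ _ _).mp h) hine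
        | cons p rest => exact ⟨p, rest, rfl⟩
      have hmax : PySem.List.max? ((l0 :: t).foldl
          (fun (d : PySem.Dict String Int) log =>
            d.insert (pvGet log "service") (d.getD (pvGet log "service") 0 + 1)) PySem.Dict.empty).items
          (fun x => x.2) = some p := by
        rw [← pv_head_sorted_rev_eq_max?, hs]; rfl
      rw [hmax, hs]
      obtain ⟨top, ec⟩ := p
      simp only [List.isEmpty_cons, Bool.false_eq_true, if_false]
      exact pv_chain (pvLine0 ++ pvLine1 top ec) _ _ _ pvLine2 pvLine3 pvLine4 pvLine5
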